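-- pv_equiv track=rewrite | github.com/alberto-equihua/testdacodes | matrixs/snake.py | get_last_direction
-- ===== SOURCE A (Python) =====
-- def get_last_direction(ar):
--     last_dir = ""
--     dir = ["R","D","L","U"]
--     rows, cols = len(ar), len(ar[0])
--     r, c, index_dir = 0, -1, -1
--     nextturn = stepsx = cols
--     stepsy = rows-1
--     inc_c, inc_r = 1, 0
--     turns = 0
--     for i in range(rows*cols):
--         c += inc_c
--         r += inc_r
--
--         if i == nextturn-1:
--             turns += 1
--             index_dir += 1
--             dir.append(dir[index_dir])
--             last_dir = dir[index_dir]
--             if turns%2==0: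
--                 nextturn += stepsx
--                 stepsy -= 1
--             else:
--                 nextturn += stepsy
--                 stepsx -= 1
--             inc_c, inc_r = -inc_r, inc_c
--     return last_dir
-- ===== SOURCE B (Python) =====
-- def get_last_direction(ar):
--     # Closed form: the spiral's last turn direction depends only on the
--     # matrix shape. Peeling one row+column per pair of turns shows:
--     #   cols >= rows -> last move horizontal: "R" if rows is odd else "L"
--     #   cols <  rows -> last move vertical:   "D" if cols is odd else "U"
--     rows, cols = len(ar), len(ar[0])
--     if cols == 0:
--         return ""
--     if cols >= rows:
--         return "R" if rows % 2 else "L"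
--     return "D" if cols % 2 else "U"
-- ===== Notes on version B (the rewrite author's own statement) =====
-- stated objective: faster
-- what changed: Replaces the cell-by-cell spiral simulation (rows*cols loop iterations with turn bookkeeping) by an O(1) closed-form answer from the matrix shape alone.
import Mathlib
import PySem

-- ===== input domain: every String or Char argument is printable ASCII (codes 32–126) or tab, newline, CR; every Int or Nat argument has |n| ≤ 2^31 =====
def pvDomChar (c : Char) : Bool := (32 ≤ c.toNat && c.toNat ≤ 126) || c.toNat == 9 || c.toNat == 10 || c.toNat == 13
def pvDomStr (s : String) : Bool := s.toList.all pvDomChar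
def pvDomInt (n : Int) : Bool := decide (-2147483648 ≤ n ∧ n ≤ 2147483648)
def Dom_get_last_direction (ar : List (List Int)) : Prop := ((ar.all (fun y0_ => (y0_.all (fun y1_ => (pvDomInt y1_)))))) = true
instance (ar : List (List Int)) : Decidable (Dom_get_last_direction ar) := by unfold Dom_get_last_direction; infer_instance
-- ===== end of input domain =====

-- B replaces A's cell-by-cell spiral simulation by an O(1) closed form from the matrix shape (faster, asymptotic).

-- ===== PORT A =====
-- loop state of A's for-loop, one field per Python variable
structure SnakeSt where
  last_dir : String
  dir : List String
  r : Int
  c : Int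
  index_dir : Int
  nextturn : Int
  stepsx : Int
  stepsy : Int
  inc_c : Int
  inc_r : Int
  turns : Int
deriving Repr, DecidableEq

-- one iteration of A's loop body
def snakeStep (s : SnakeSt) (i : Int) : SnakeSt :=
  let c := s.c + s.inc_c
  let r := s.r + s.inc_r
  if i = s.nextturn - 1 then
    let turns := s.turns + 1
    let index_dir := s.index_dir + 1
    -- dir[index_dir]: index_dir is always in range in A, so the IndexError default is never used
    let d := (PySem.List.pyGet? s.dir index_dir).getD ""
    let dir := s.dir ++ [d]
    if turns % 2 = 0 then
      { last_dir := d, dir := dir, r := r, c := c, index_dir := index_dir,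
        nextturn := s.nextturn + s.stepsx, stepsx := s.stepsx, stepsy := s.stepsy - 1,
        inc_c := -s.inc_r, inc_r := s.inc_c, turns := turns }
    else
      { last_dir := d, dir := dir, r := r, c := c, index_dir := index_dir,
        nextturn := s.nextturn + s.stepsy, stepsx := s.stepsx - 1, stepsy := s.stepsy,
        inc_c := -s.inc_r, inc_r := s.inc_c, turns := turns }
  else
    { s with r := r, c := c }

def get_last_direction (ar : List (List Int)) : String :=
  let rows : Int := ar.length
  -- ar[0]: IndexError on ar = [] is excluded by Pre_get_last_direction
  let cols : Int := ((PySem.List.pyGet? ar 0).getD []).length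
  let s0 : SnakeSt := { last_dir := "", dir := ["R", "D", "L", "U"], r := 0, c := -1,
                        index_dir := -1, nextturn := cols, stepsx := cols,
                        stepsy := rows - 1, inc_c := 1, inc_r := 0, turns := 0 }
  ((PySem.List.pyRange 0 (rows * cols) 1).foldl snakeStep s0).last_dir

-- ===== PORT B =====
def get_last_direction_alt (ar : List (List Int)) : String :=
  let rows : Int := ar.length
  let cols : Int := ((PySem.List.pyGet? ar 0).getD []).length
  if cols = 0 then ""
  else if cols ≥ rows then (if rows % 2 ≠ 0 then "R" else "L")
  else (if cols % 2 ≠ 0 then "D" else "U")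

-- ===== PRECONDITION & SPEC =====
-- Pre_ excludes only the empty list, on which A raises IndexError at ar[0].
def Pre_get_last_direction (ar : List (List Int)) : Prop := ar ≠ []
instance (ar : List (List Int)) : Decidable (Pre_get_last_direction ar) := by unfold Pre_get_last_direction; infer_instance
def pvWitness_get_last_direction : List (List Int) := [[1, 2], [3, 4]]
def Spec_get_last_direction (ar : List (List Int)) (out : String) : Prop := out = get_last_direction_alt ar
instance (ar : List (List Int)) (out : String) : Decidable (Spec_get_last_direction ar out) := by unfold Spec_get_last_direction; infer_instance

-- ===== CLAIM (what is proved, stated in full; the proofs are below) =====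
def Claim_equal_get_last_direction : Prop := ∀ (ar : List (List Int)), Dom_get_last_direction ar → Pre_get_last_direction ar → Spec_get_last_direction ar (get_last_direction ar)

-- ===== LEMMAS AND PROOFS =====

-- the cyclic direction table: dir[j] = cyc j for every j
def cyc (j : Nat) : String :=
  if j % 4 = 0 then "R" else if j % 4 = 1 then "D" else if j % 4 = 2 then "L" else "U"

lemma cyc_add_four (j : Nat) : cyc (j + 4) = cyc j := by
  unfold cyc
  have : (j + 4) % 4 = j % 4 := by omega
  rw [this]

-- abstract turn process: m iterations remain, the next turn is d steps ahead,
-- stepsx = x, stepsy = y, turns = t; returns the final number of turns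
def spin (m : Nat) (d x y : Int) (t : Nat) : Nat :=
  if h : 0 ≤ d ∧ d < (m : Int) then
    if (t + 1) % 2 = 0 then spin (m - (d.toNat + 1)) (x - 1) x (y - 1) (t + 1)
    else spin (m - (d.toNat + 1)) (y - 1) (x - 1) y (t + 1)
  else t
termination_by m
decreasing_by all_goals omega

lemma spin_ge (m : Nat) (d x y : Int) (t : Nat) : t ≤ spin m d x y t := by
  induction m using Nat.strong_induction_on generalizing d x y t with
  | _ m ih =>
    rw [spin]
    split
    · rename_i h
      split
      · exact le_trans (by omega) (ih _ (by omega) _ _ _ _)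
      · exact le_trans (by omega) (ih _ (by omega) _ _ _ _)
    · exact le_rfl

lemma spin_shift (m : Nat) (d x y : Int) (t : Nat) (hd : d ≠ 0) :
    spin (m + 1) d x y t = spin m (d - 1) x y t := by
  conv_lhs => rw [spin]
  conv_rhs => rw [spin]
  by_cases h : 0 ≤ d - 1 ∧ d - 1 < (m : Int)
  · rw [dif_pos (by push_cast; omega), dif_pos h,
        show m + 1 - (d.toNat + 1) = m - ((d - 1).toNat + 1) by omega]
  · rw [dif_neg (by push_cast; omega), dif_neg h]

lemma spin_neg (m : Nat) (d x y : Int) (t : Nat) (hd : d < 0) : spin m d x y t = t := by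
  rw [spin, dif_neg (by omega)]

-- dir-table invariant carried through the loop
def DirInv (l : List String) (t : Nat) : Prop :=
  l.length = 4 + t ∧ ∀ j : Nat, j < 4 + t → l[j]? = some (cyc j)

lemma dirInv_snoc (l : List String) (t : Nat) (h : DirInv l t) :
    DirInv (l ++ [cyc t]) (t + 1) := by
  obtain ⟨hlen, hget⟩ := h
  constructor
  · simp [hlen]; omega
  · intro j hj
    by_cases hj4 : j < 4 + t
    · rw [List.getElem?_append_left (by omega)]
      exact hget j hj4
    · have hj' : j = 4 + t := by omega
      subst hj'
      have hc : cyc (4 + t) = cyc t := by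
        rw [show 4 + t = t + 4 by omega, cyc_add_four]
      rw [List.getElem?_append_right (by omega), hc, hlen]
      simp

-- the loop of A, summarised by spin: induction over the iteration count
lemma loop_last (m : Nat) : ∀ (a : Int) (ld : String) (dirl : List String)
    (r c n x y ic ir : Int) (t : Nat), DirInv dirl t →
    ((PySem.List.pyRange a (a + m) 1).foldl snakeStep
        ⟨ld, dirl, r, c, (t : Int) - 1, n, x, y, ic, ir, (t : Int)⟩).last_dir
      = (if spin m (n - 1 - a) x y t = t then ld else cyc (spin m (n - 1 - a) x y t - 1)) := by
  induction m with
  | zero =>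
    intro a ld dirl r c n x y ic ir t _
    rw [show a + ((0 : Nat) : Int) = a by push_cast; ring, PySem.List.pyRange_one_eq_nil le_rfl,
        spin, dif_neg (by push_cast; omega)]
    simp
  | succ m ih =>
    intro a ld dirl r c n x y ic ir t hdi
    have hlen := hdi.1
    have hget := hdi.2
    rw [PySem.List.pyRange_one_cons (by push_cast; omega),
        show a + ((m + 1 : Nat) : Int) = (a + 1) + ((m : Nat) : Int) by push_cast; ring]
    simp only [List.foldl_cons]
    by_cases hd : a = n - 1
    · -- turn event at i = a
      have hread : (PySem.List.pyGet? dirl ((t : Int) - 1 + 1)).getD "" = cyc t := by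
        rw [show (t : Int) - 1 + 1 = ((t : Nat) : Int) by ring, PySem.List.pyGet?_natCast,
            hget t (by omega)]
        rfl
      have hdirinv' := dirInv_snoc dirl t hdi
      have hd0 : n - 1 - a = 0 := by omega
      rw [hd0]
      by_cases hp : ((t : Int) + 1) % 2 = 0
      · -- even turn
        have hstate : snakeStep ⟨ld, dirl, r, c, (t : Int) - 1, n, x, y, ic, ir, (t : Int)⟩ a
            = ⟨cyc t, dirl ++ [cyc t], r + ir, c + ic, ((t + 1 : Nat) : Int) - 1,
               n + x, x, y - 1, -ir, ic, ((t + 1 : Nat) : Int)⟩ := by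
          simp only [snakeStep]
          rw [if_pos hd, if_pos hp, hread]
          simp only [SnakeSt.mk.injEq]
          and_intros <;> first | trivial | (push_cast; ring)
        rw [hstate, ih (a + 1) (cyc t) (dirl ++ [cyc t]) (r + ir) (c + ic) (n + x) x (y - 1)
              (-ir) ic (t + 1) hdirinv']
        have harg : n + x - 1 - (a + 1) = x - 1 := by omega
        have hspin : spin (m + 1) 0 x y t = spin m (x - 1) x (y - 1) (t + 1) := by
          have hc1 : (0 : Int) ≤ 0 ∧ (0 : Int) < ((m + 1 : Nat) : Int) := ⟨le_rfl, by push_cast; omega⟩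
          have hpN : (t + 1) % 2 = 0 := by omega
          conv_lhs => rw [spin]
          rw [dif_pos hc1, if_pos hpN]
          norm_num
        rw [harg, hspin]
        have hge := spin_ge m (x - 1) x (y - 1) (t + 1)
        by_cases hT : spin m (x - 1) x (y - 1) (t + 1) = t + 1
        · rw [if_pos hT, if_neg (by omega), hT]
          simp
        · rw [if_neg hT, if_neg (by omega)]
      · -- odd turn
        have hstate : snakeStep ⟨ld, dirl, r, c, (t : Int) - 1, n, x, y, ic, ir, (t : Int)⟩ a
            = ⟨cyc t, dirl ++ [cyc t], r + ir, c + ic, ((t + 1 : Nat) : Int) - 1,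
               n + y, x - 1, y, -ir, ic, ((t + 1 : Nat) : Int)⟩ := by
          simp only [snakeStep]
          rw [if_pos hd, if_neg hp, hread]
          simp only [SnakeSt.mk.injEq]
          and_intros <;> first | trivial | (push_cast; ring)
        rw [hstate, ih (a + 1) (cyc t) (dirl ++ [cyc t]) (r + ir) (c + ic) (n + y) (x - 1) y
              (-ir) ic (t + 1) hdirinv']
        have harg : n + y - 1 - (a + 1) = y - 1 := by omega
        have hspin : spin (m + 1) 0 x y t = spin m (y - 1) (x - 1) y (t + 1) := by
          have hc1 : (0 : Int) ≤ 0 ∧ (0 : Int) < ((m + 1 : Nat) : Int) := ⟨le_rfl, by push_cast; omega⟩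
          have hpN : ¬ (t + 1) % 2 = 0 := by omega
          conv_lhs => rw [spin]
          rw [dif_pos hc1, if_neg hpN]
          norm_num
        rw [harg, hspin]
        have hge := spin_ge m (y - 1) (x - 1) y (t + 1)
        by_cases hT : spin m (y - 1) (x - 1) y (t + 1) = t + 1
        · rw [if_pos hT, if_neg (by omega), hT]
          simp
        · rw [if_neg hT, if_neg (by omega)]
    · -- no event at i = a
      have hstate : snakeStep ⟨ld, dirl, r, c, (t : Int) - 1, n, x, y, ic, ir, (t : Int)⟩ a
          = ⟨ld, dirl, r + ir, c + ic, (t : Int) - 1, n, x, y, ic, ir, (t : Int)⟩ := by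
        simp only [snakeStep]
        rw [if_neg hd]
      rw [hstate, ih (a + 1) ld dirl (r + ir) (c + ic) n x y ic ir t hdi,
          show n - 1 - (a + 1) = (n - 1 - a) - 1 by ring,
          ← spin_shift m (n - 1 - a) x y t (by omega)]

-- closed form for spin on a full spiral: peel one row + one column per two turns
lemma spiralT (r : Nat) : ∀ (c : Nat) (t : Nat), 1 ≤ r → 1 ≤ c → t % 2 = 0 →
    spin (r * c) ((c : Int) - 1) (c : Int) ((r : Int) - 1) t
      = if r ≤ c then t + 2 * r - 1 else t + 2 * c := by
  induction r using Nat.strong_induction_on with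
  | _ r ih =>
    intro c t hr hc ht
    have hcond1 : (0 : Int) ≤ (c : Int) - 1 ∧ (c : Int) - 1 < ((r * c : Nat) : Int) := by
      constructor
      · omega
      · have hx : (c : Int) ≤ ((r * c : Nat) : Int) := by push_cast; nlinarith
        omega
    have hp1 : ¬ (t + 1) % 2 = 0 := by omega
    conv_lhs => rw [spin]
    rw [dif_pos hcond1, if_neg hp1]
    have hm1 : r * c - (((c : Int) - 1).toNat + 1) = (r - 1) * c := by
      rw [show ((c : Int) - 1).toNat = c - 1 by omega, show c - 1 + 1 = c by omega,
          Nat.sub_mul, Nat.one_mul]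
    rw [hm1]
    by_cases hr1 : r = 1
    · subst hr1
      rw [show (1 - 1) * c = 0 by norm_num,
          spin_neg 0 _ _ _ (t + 1) (by norm_num), if_pos hc]
      omega
    · -- r ≥ 2: second (vertical) turn
      have hcond2 : (0 : Int) ≤ (r : Int) - 1 - 1 ∧ (r : Int) - 1 - 1 < (((r - 1) * c : Nat) : Int) := by
        constructor
        · omega
        · have hx : (((r - 1) * c : Nat) : Int) = ((r : Int) - 1) * c := by
            push_cast [Nat.cast_sub (by omega : 1 ≤ r)]; ring
          rw [hx]
          nlinarith [Int.ofNat_le.mpr hr, Int.ofNat_le.mpr hc]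
      have hp2 : (t + 1 + 1) % 2 = 0 := by omega
      conv_lhs => rw [spin]
      rw [dif_pos hcond2, if_pos hp2]
      have hm2 : (r - 1) * c - (((r : Int) - 1 - 1).toNat + 1) = (r - 1) * (c - 1) := by
        rw [show ((r : Int) - 1 - 1).toNat = r - 2 by omega, show r - 2 + 1 = r - 1 by omega,
            Nat.mul_sub, Nat.mul_one]
      rw [hm2]
      by_cases hc1 : c = 1
      · subst hc1
        rw [show (r - 1) * (1 - 1) = 0 by norm_num,
            spin_neg 0 _ _ _ (t + 2) (by norm_num),
            if_neg (show ¬ r ≤ 1 by omega)]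
      · have hIH := ih (r - 1) (by omega) (c - 1) (t + 2) (by omega) (by omega) (by omega)
        rw [show (((c - 1 : Nat)) : Int) = (c : Int) - 1 by omega,
            show (((r - 1 : Nat)) : Int) = (r : Int) - 1 by omega] at hIH
        rw [hIH]
        by_cases hle : r ≤ c
        · rw [if_pos (show r - 1 ≤ c - 1 by omega), if_pos hle]; omega
        · rw [if_neg (show ¬ r - 1 ≤ c - 1 by omega), if_neg hle]; omega

-- ===== VERDICT (by name: the statement is the Claim_ definition above) =====
theorem get_last_direction_spec : Claim_equal_get_last_direction := by
  intro ar _ hpre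
  unfold Spec_get_last_direction
  cases ar with
  | nil => exact absurd rfl hpre
  | cons h tl =>
    have hget0 : (PySem.List.pyGet? (h :: tl) 0).getD [] = h := by
      simp [PySem.List.pyGet?, PySem.List.pyIdx?]
    unfold get_last_direction get_last_direction_alt
    simp only [hget0]
    set R : Nat := (h :: tl).length with hR
    set C : Nat := h.length with hC
    have hdirinv0 : DirInv ["R", "D", "L", "U"] 0 := by
      constructor
      · rfl
      · intro j hj
        interval_cases j <;> rfl
    have hmain := loop_last (R * C) 0 "" ["R", "D", "L", "U"] 0 (-1) (C : Int) (C : Int)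
        ((R : Int) - 1) 1 0 0 hdirinv0
    rw [show ((0 : Nat) : Int) = (0 : Int) from rfl, show (0 : Int) - 1 = -1 by norm_num] at hmain
    rw [show (R : Int) * (C : Int) = 0 + ((R * C : Nat) : Int) by push_cast; ring, hmain]
    have hR1 : 1 ≤ R := by simp [hR]
    by_cases hC0 : C = 0
    · rw [hC0, show R * 0 = 0 by norm_num,
          spin_neg 0 (((0 : Nat) : Int) - 1 - 0) ((0 : Nat) : Int) ((R : Int) - 1) 0 (by norm_num),
          if_pos rfl, if_pos (by norm_num)]
    · have hT := spiralT R C 0 hR1 (by omega) rfl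
      rw [show (C : Int) - 1 - 0 = (C : Int) - 1 by ring, hT]
      rw [if_neg (by omega : ¬ (C : Int) = 0)]
      by_cases hle : R ≤ C
      · rw [if_pos hle, if_pos (by omega : (C : Int) ≥ (R : Int))]
        by_cases hodd : R % 2 = 0
        · rw [if_neg (by omega), if_neg (by omega : ¬ (R : Int) % 2 ≠ 0)]
          unfold cyc
          rw [if_neg (by omega), if_neg (by omega), if_pos (by omega)]
        · rw [if_neg (by omega), if_pos (by omega : (R : Int) % 2 ≠ 0)]
          unfold cyc
          rw [if_pos (by omega)]
      · rw [if_neg hle, if_neg (by omega : ¬ (C : Int) ≥ (R : Int))]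
        by_cases hodd : C % 2 = 0
        · rw [if_neg (by omega), if_neg (by omega : ¬ (C : Int) % 2 ≠ 0)]
          unfold cyc
          rw [if_neg (by omega), if_neg (by omega), if_neg (by omega)]
        · rw [if_neg (by omega), if_pos (by omega : (C : Int) % 2 ≠ 0)]
          unfold cyc
          rw [if_neg (by omega), if_pos (by omega)]
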